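-- pv_equiv track=rewrite | github.com/3b1b/manim | manimlib/mobject/CodeMobject.py | handling_braces
-- ===== SOURCE A (Python) =====
-- def handling_braces(text):
--     text_array_full = []
--     if "{" in text or "}" in text:
--         text_array = []
--         text_parts = text.split("{")
--         text_array.append(text_parts[0])
--         for j in range(1, text_parts.__len__()):
--             text_array.append("{")
--             text_array.append(text_parts[j])
--         for i in range(0, text_array.__len__()):
--             if "}" in text_array[i]:
--                 text_parts = text_array[i].split("}")
--                 text_array_full.append(text_parts[0])
--                 for j in range(1, text_parts.__len__()):
--                     text_array_full.append("}")
--                     text_array_full.append(text_parts[j])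
--             else:
--                 text_array_full.append(text_array[i])
--     else:
--         text_array_full.append(text)
--     text_array_full = list(filter(lambda
--                                       a: a != '' and
--                                          a != ' ' and
--                                          a != '  ' and
--                                          a != '   ' and
--                                          a != '    ' and
--                                          a != '     ' and
--                                          a != '      ',
--                                   text_array_full))
--     return text_array_full
-- ===== SOURCE B (Python) =====
-- def handling_braces(text):
--     # single linear scan: cut the text at every brace, keeping braces as tokens
--     tokens = []
--     buf = []
--     for ch in text:
--         if ch == '{' or ch == '}':
--             tokens.append(''.join(buf))
--             tokens.append(ch)
--             buf = []
--         else: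
--             buf.append(ch)
--     tokens.append(''.join(buf))
--     return [t for t in tokens
--             if t not in ('', ' ', '  ', '   ', '    ', '     ', '      ')]
-- ===== Notes on version B (the rewrite author's own statement) =====
-- stated objective: simpler
-- what changed: Replaced A's split-on-'{' followed by a second per-piece split-on-'}' interleaving pass (plus the brace-presence branch) by a single linear scan over the characters that flushes a buffer at every brace; the same whitespace filter is applied at the end.
import Mathlib
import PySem

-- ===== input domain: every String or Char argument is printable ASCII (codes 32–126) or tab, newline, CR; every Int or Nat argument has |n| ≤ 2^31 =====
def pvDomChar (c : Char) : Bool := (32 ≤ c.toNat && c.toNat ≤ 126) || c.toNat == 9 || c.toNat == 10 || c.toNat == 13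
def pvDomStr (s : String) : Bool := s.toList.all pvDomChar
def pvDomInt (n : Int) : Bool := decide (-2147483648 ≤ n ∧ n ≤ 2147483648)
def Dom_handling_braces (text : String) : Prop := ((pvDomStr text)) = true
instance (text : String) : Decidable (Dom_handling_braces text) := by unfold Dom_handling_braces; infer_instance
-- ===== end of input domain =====

-- B replaces A's two nested split-and-interleave passes by one linear character scan with a buffer (objective: simpler); same return value.

-- ===== PORT A =====
-- A's filter lambda: keep a token iff it is not '' and not 1..6 spaces
def pvKeepA (a : String) : Bool :=
  a != "" && a != " " && a != "  " && a != "   " && a != "    " &&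
  a != "     " && a != "      "

-- python s.split(sep): sep here is always the literal nonempty "{" or "}", so split? is always some
def pvSplitStr (s sep : String) : List String := (PySem.Str.split? s sep).getD []

def handling_braces (text : String) : List String :=
  let text_array_full :=
    if PySem.Str.isIn "{" text || PySem.Str.isIn "}" text then
      let text_parts := pvSplitStr text "{"
      let text_array :=
        (PySem.List.pyRange 1 (PySem.List.len text_parts)).foldl
          (fun arr j => arr ++ ["{", PySem.List.pyGetD text_parts j ""])
          [PySem.List.pyGetD text_parts 0 ""]
      (PySem.List.pyRange 0 (PySem.List.len text_array)).foldl
        (fun acc i =>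
          let s := PySem.List.pyGetD text_array i ""
          if PySem.Str.isIn "}" s then
            let parts := pvSplitStr s "}"
            (PySem.List.pyRange 1 (PySem.List.len parts)).foldl
              (fun acc2 j => acc2 ++ ["}", PySem.List.pyGetD parts j ""])
              (acc ++ [PySem.List.pyGetD parts 0 ""])
          else acc ++ [s])
        []
    else [text]
  text_array_full.filter pvKeepA

-- ===== PORT B =====
-- B's comprehension condition: t not in ('', ' ', …, '      ')
def pvKeepB (t : String) : Bool :=
  !(t == "" || t == " " || t == "  " || t == "   " || t == "    " ||
    t == "     " || t == "      ")

def handling_braces_alt (text : String) : List String :=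
  let st :=
    text.toList.foldl
      (fun (st : List String × List Char) ch =>
        if ch = '{' ∨ ch = '}' then
          (st.1 ++ [String.ofList st.2, String.ofList [ch]], [])
        else
          (st.1, st.2 ++ [ch]))
      ([], [])
  (st.1 ++ [String.ofList st.2]).filter pvKeepB

-- ===== PRECONDITION & SPEC =====
def Spec_handling_braces (text : String) (out : List String) : Prop := out = handling_braces_alt text
instance (text : String) (out : List String) : Decidable (Spec_handling_braces text out) := by unfold Spec_handling_braces; infer_instance

-- ===== CLAIM (what is proved, stated in full; the proofs are below) =====
def Claim_equal_handling_braces : Prop := ∀ (text : String), Dom_handling_braces text → Spec_handling_braces text (handling_braces text)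

-- ===== LEMMAS AND PROOFS =====

-- split on a single character, as (first piece, remaining pieces)

def pvSplit1 (b : Char) : List Char → List Char × List (List Char)
  | [] => ([], [])
  | c :: cs =>
    let r := pvSplit1 b cs
    if c = b then ([], r.1 :: r.2) else (c :: r.1, r.2)

def pvTok : List Char → List Char × List (List Char)
  | [] => ([], [])
  | c :: cs =>
    let r := pvTok cs
    if c = '{' ∨ c = '}' then ([], [c] :: r.1 :: r.2) else (c :: r.1, r.2)

theorem pvSplitOn_go_spec (b : Char) (fuel : Nat) :
    ∀ (l cur : List Char) (acc : List (List Char)), l.length < fuel →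
      PySem.Chars.splitOn.go [b] fuel l cur acc =
        acc.reverse ++ (cur.reverse ++ (pvSplit1 b l).1) :: (pvSplit1 b l).2 := by
  induction fuel with
  | zero => intro l cur acc h; omega
  | succ n ih =>
    intro l cur acc h
    cases l with
    | nil => simp [PySem.Chars.splitOn.go, pvSplit1]
    | cons c rest =>
      have hrest : rest.length < n := by simp at h; omega
      rw [PySem.Chars.splitOn.go.eq_def]
      by_cases hc : c = b
      · subst hc
        simp [List.isPrefixOf, ih rest [] (cur.reverse :: acc) hrest, pvSplit1]
      · simp [List.isPrefixOf, hc, Ne.symm hc, ih rest (c :: cur) acc hrest, pvSplit1]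

theorem pvSplitOn_single (b : Char) (l : List Char) :
    PySem.Chars.splitOn l [b] = (pvSplit1 b l).1 :: (pvSplit1 b l).2 := by
  unfold PySem.Chars.splitOn
  rw [pvSplitOn_go_spec b (l.length + 1) l [] [] (by omega)]
  simp

theorem pvTok_eq_two_stage (l : List Char) :
    (pvTok l).1 :: (pvTok l).2 =
      ((pvSplit1 '{' l).1 :: (pvSplit1 '{' l).2.flatMap (fun p => [['{'], p])).flatMap
        (fun p => (pvSplit1 '}' p).1 :: (pvSplit1 '}' p).2.flatMap (fun q => [['}'], q])) := by
  induction l with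
  | nil => simp [pvTok, pvSplit1]
  | cons c cs ih =>
    by_cases h1 : c = '{'
    · subst h1
      simp only [pvTok, pvSplit1]
      simp only [List.flatMap_cons] at ih ⊢
      simp [pvSplit1, ih]
    · by_cases h2 : c = '}'
      · subst h2
        simp only [pvTok, pvSplit1, if_neg (by decide : ¬ ('}' : Char) = '{')]
        simp only [List.flatMap_cons] at ih ⊢
        simp [pvSplit1, ih]
      · simp only [pvTok, pvSplit1, if_neg h1, if_neg (by tauto : ¬ (c = '{' ∨ c = '}'))]
        simp only [List.flatMap_cons] at ih ⊢
        simp only [pvSplit1, if_neg h2, List.cons_append]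
        injection ih with ihh iht
        simp [ihh, iht]

-- the interleaved pieces a string contributes to text_array_full (split on '}' keeping braces)
def pvE (s : String) : List String :=
  ((pvSplit1 '}' s.toList).1 :: (pvSplit1 '}' s.toList).2.flatMap (fun q => [['}'], q])).map String.ofList

theorem pvSplitStr_single (s sep : String) (b : Char) (h : sep.toList = [b]) :
    pvSplitStr s sep = ((pvSplit1 b s.toList).1 :: (pvSplit1 b s.toList).2).map String.ofList := by
  have hm := PySem.Str.split?_map s sep
  rw [h] at hm
  unfold PySem.Chars.split? at hm
  simp only [List.isEmpty_cons, Bool.false_eq_true, if_false] at hm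
  cases hs : PySem.Str.split? s sep with
  | none => rw [hs] at hm; simp at hm
  | some parts =>
    rw [hs] at hm
    simp only [Option.map_some, Option.some.injEq] at hm
    have : parts = (PySem.Chars.splitOn s.toList [b]).map String.ofList := by
      rw [← hm, List.map_map]
      simp [Function.comp_def, String.ofList_toList]
    rw [pvSplitOn_single] at this
    simp [pvSplitStr, hs, this]

theorem pvSplit1_not_mem (b : Char) (l : List Char) (h : b ∉ l) :
    pvSplit1 b l = (l, []) := by
  induction l with
  | nil => rfl
  | cons c cs ih =>
    simp only [List.mem_cons, not_or] at h
    simp [pvSplit1, ih h.2, Ne.symm h.1]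

theorem pvTok_no_brace (l : List Char) (h1 : '{' ∉ l) (h2 : '}' ∉ l) :
    pvTok l = (l, []) := by
  induction l with
  | nil => rfl
  | cons c cs ih =>
    simp only [List.mem_cons, not_or] at h1 h2
    simp [pvTok, ih h1.2 h2.2, Ne.symm h1.1, Ne.symm h2.1]

theorem pvE_of_no_brace (s : String) (h : '}' ∉ s.toList) : pvE s = [s] := by
  simp [pvE, pvSplit1_not_mem '}' s.toList h, String.ofList_toList]

theorem pvIsIn_false (b : Char) (bs s : String) (h : bs.toList = [b]) :
    PySem.Str.isIn bs s = false → b ∉ s.toList := by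
  intro hf hmem
  have : PySem.Str.isIn bs s = true := by
    rw [PySem.Str.isIn_iff_infix, h]
    exact (List.singleton_infix_iff b s.toList).mpr hmem
  rw [hf] at this; exact Bool.false_ne_true this

theorem pvE_ofList (p : List Char) :
    pvE (String.ofList p) =
      ((pvSplit1 '}' p).1 :: (pvSplit1 '}' p).2.flatMap (fun q => [['}'], q])).map String.ofList := by
  simp [pvE, String.toList_ofList]

-- one element of text_array contributes acc ++ pvE s to text_array_full
theorem pvBody_eq (acc : List String) (s : String) :
    (if PySem.Str.isIn "}" s then
       let parts := pvSplitStr s "}"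
       (PySem.List.pyRange 1 (PySem.List.len parts)).foldl
         (fun acc2 j => acc2 ++ ["}", PySem.List.pyGetD parts j ""])
         (acc ++ [PySem.List.pyGetD parts 0 ""])
     else acc ++ [s]) = acc ++ pvE s := by
  by_cases h : PySem.Str.isIn "}" s = true
  · rw [if_pos h]
    dsimp only
    rw [pvSplitStr_single s "}" '}' rfl]
    rw [PySem.List.foldl_pyRange_pyGetD
          (((pvSplit1 '}' s.toList).1 :: (pvSplit1 '}' s.toList).2).map String.ofList) ""
          (fun acc2 t => acc2 ++ ["}", t]) _ (by norm_num)]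
    rw [PySem.List.foldl_append_eq_flatMap (fun t => (["}", t] : List String))]
    simp [pvE, PySem.List.pyGetD_of_nonneg _ _ (le_refl 0), List.map_flatMap, List.flatMap_map]
  · rw [if_neg h, pvE_of_no_brace s (pvIsIn_false '}' "}" s rfl (by simpa using h))]

-- the then-branch of A computes the mapped token list
theorem pvA_branch (text : String) :
    (let text_parts := pvSplitStr text "{"
     let text_array :=
       (PySem.List.pyRange 1 (PySem.List.len text_parts)).foldl
         (fun arr j => arr ++ ["{", PySem.List.pyGetD text_parts j ""])
         [PySem.List.pyGetD text_parts 0 ""]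
     (PySem.List.pyRange 0 (PySem.List.len text_array)).foldl
       (fun acc i =>
         let s := PySem.List.pyGetD text_array i ""
         if PySem.Str.isIn "}" s then
           let parts := pvSplitStr s "}"
           (PySem.List.pyRange 1 (PySem.List.len parts)).foldl
             (fun acc2 j => acc2 ++ ["}", PySem.List.pyGetD parts j ""])
             (acc ++ [PySem.List.pyGetD parts 0 ""])
         else acc ++ [s])
       []) =
    ((pvTok text.toList).1 :: (pvTok text.toList).2).map String.ofList := by
  dsimp only
  rw [pvSplitStr_single text "{" '{' rfl]
  rw [PySem.List.foldl_pyRange_pyGetD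
        (((pvSplit1 '{' text.toList).1 :: (pvSplit1 '{' text.toList).2).map String.ofList) ""
        (fun arr t => arr ++ ["{", t]) _ (by norm_num)]
  rw [PySem.List.foldl_append_eq_flatMap (fun t => (["{", t] : List String))]
  have hTA : [PySem.List.pyGetD (((pvSplit1 '{' text.toList).1 :: (pvSplit1 '{' text.toList).2).map String.ofList) 0 ""] ++
      List.flatMap (fun t => (["{", t] : List String))
        (List.drop (1:Int).toNat (((pvSplit1 '{' text.toList).1 :: (pvSplit1 '{' text.toList).2).map String.ofList)) =
      ((pvSplit1 '{' text.toList).1 :: (pvSplit1 '{' text.toList).2.flatMap (fun p => [['{'], p])).map String.ofList := by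
    simp [PySem.List.pyGetD_of_nonneg _ _ (le_refl 0), List.map_flatMap, List.flatMap_map]
  rw [hTA]
  rw [PySem.List.foldl_pyRange_pyGetD
        (((pvSplit1 '{' text.toList).1 :: (pvSplit1 '{' text.toList).2.flatMap (fun p => [['{'], p])).map String.ofList) ""
        (fun acc s =>
          if PySem.Str.isIn "}" s then
            let parts := pvSplitStr s "}"
            (PySem.List.pyRange 1 (PySem.List.len parts)).foldl
              (fun acc2 j => acc2 ++ ["}", PySem.List.pyGetD parts j ""])
              (acc ++ [PySem.List.pyGetD parts 0 ""])
          else acc ++ [s]) _ (le_refl 0)]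
  rw [List.foldl_ext _ (fun acc s => acc ++ pvE s) _ (fun acc s _ => pvBody_eq acc s)]
  rw [PySem.List.foldl_append_eq_flatMap pvE]
  rw [pvTok_eq_two_stage]
  have hE : pvE "{" = ["{"] := rfl
  have h2 : pvSplit1 '}' ['{'] = (['{'], []) := rfl
  have h3 : String.ofList ['{'] = "{" := rfl
  simp [pvE_ofList, List.map_flatMap, List.flatMap_assoc, hE, h2, h3]

-- B's fold, with the final buffer flushed, appends the token list
theorem pvB_fold (l : List Char) : ∀ (toks : List String) (buf : List Char),
    (l.foldl
        (fun (st : List String × List Char) ch =>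
          if ch = '{' ∨ ch = '}' then
            (st.1 ++ [String.ofList st.2, String.ofList [ch]], [])
          else
            (st.1, st.2 ++ [ch]))
        (toks, buf)).1 ++
      [String.ofList (l.foldl
        (fun (st : List String × List Char) ch =>
          if ch = '{' ∨ ch = '}' then
            (st.1 ++ [String.ofList st.2, String.ofList [ch]], [])
          else
            (st.1, st.2 ++ [ch]))
        (toks, buf)).2] =
    toks ++ ((buf ++ (pvTok l).1) :: (pvTok l).2).map String.ofList := by
  induction l with
  | nil => intro toks buf; simp [pvTok]
  | cons c cs ih =>
    intro toks buf
    by_cases hc : c = '{' ∨ c = '}'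
    · simp only [List.foldl_cons, if_pos hc, ih, pvTok]
      simp
    · simp only [List.foldl_cons, if_neg hc, ih, pvTok]
      simp

theorem pvKeep_eq : pvKeepA = pvKeepB := by
  funext s
  simp [pvKeepA, pvKeepB, bne]

-- ===== VERDICT (by name: the statement is the Claim_ definition above) =====
theorem handling_braces_spec : Claim_equal_handling_braces := by
  intro text _
  unfold Spec_handling_braces handling_braces handling_braces_alt
  dsimp only
  rw [pvB_fold text.toList [] []]
  by_cases hbr : (PySem.Str.isIn "{" text || PySem.Str.isIn "}" text) = true
  · rw [if_pos hbr, pvA_branch text]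
    simp [pvKeep_eq]
  · rw [if_neg hbr]
    simp only [Bool.or_eq_true, not_or, Bool.not_eq_true] at hbr
    have h1 := pvIsIn_false '{' "{" text rfl hbr.1
    have h2 := pvIsIn_false '}' "}" text rfl hbr.2
    rw [pvTok_no_brace text.toList h1 h2]
    simp [pvKeep_eq, String.ofList_toList]
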